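-- pv_equiv track=rewrite | github.com/Crispr-cass9/Ejercicios-entrevistas | Ejercicio_2.py | solution
-- ===== SOURCE A (Python) =====
-- def solution(inputString):
--     maximo = 0
--     if len(inputString) <= 1:
--         return False
--     for letra in inputString:
--         if inputString.count(letra)%2!=0 and len(inputString)%2 == 0:
--             return False
--         elif inputString.count(letra)%2!=0 and len(inputString)%2 == 1:
--             maximo += 1
--         if maximo>1:
--             return False
--         inputString =  [caracter for caracter in inputString if caracter != letra]
--     else:
--         return True
-- ===== SOURCE B (Python) =====
-- def solution(inputString):
--     if len(inputString) <= 1: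
--         return False
--     counts = {}
--     for ch in inputString:
--         counts[ch] = counts.get(ch, 0) + 1
--     odd = sum(v % 2 for v in counts.values())
--     return odd <= 1
-- ===== Notes on version B (the rewrite author's own statement) =====
-- stated objective: faster
-- what changed: Replaces A's loop that re-counts and rebuilds the string on every iteration (quadratic) with a single frequency-dict pass followed by a check that at most one character count is odd, which provably equals A's shrinking-length/odd-tally simulation.
import Mathlib
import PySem

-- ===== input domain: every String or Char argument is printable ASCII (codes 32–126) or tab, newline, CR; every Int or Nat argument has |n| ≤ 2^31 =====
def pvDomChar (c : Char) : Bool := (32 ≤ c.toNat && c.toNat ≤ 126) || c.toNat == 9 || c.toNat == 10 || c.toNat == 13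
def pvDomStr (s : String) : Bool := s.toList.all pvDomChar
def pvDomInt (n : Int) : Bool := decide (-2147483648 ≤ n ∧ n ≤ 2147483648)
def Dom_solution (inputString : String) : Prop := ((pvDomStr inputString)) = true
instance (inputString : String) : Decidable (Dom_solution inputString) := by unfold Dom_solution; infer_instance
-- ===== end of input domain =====

-- B replaces A's per-character recount-and-rebuild loop (quadratic) by one frequency
-- dict pass plus a check that at most one character count is odd; objective: faster.

-- ===== PORT A =====
-- A's for-loop: iterates over the ORIGINAL string's characters (Python's iterator is
-- bound before the reassignment), while `inputString` shrinks to the filtered list.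
def solutionLoop : List Char → List Char → Int → Bool
  | _, [], _ => true
  | rem, letra :: rest, maximo =>
    if rem.count letra % 2 ≠ 0 ∧ rem.length % 2 = 0 then false
    else
      let maximo' := if rem.count letra % 2 ≠ 0 ∧ rem.length % 2 = 1 then maximo + 1 else maximo
      if maximo' > 1 then false
      else solutionLoop (rem.filter (· != letra)) rest maximo'

def solution (inputString : String) : Bool :=
  if inputString.toList.length ≤ 1 then false
  else solutionLoop inputString.toList inputString.toList 0

-- ===== PORT B =====
def solution_alt (inputString : String) : Bool :=
  if inputString.toList.length ≤ 1 then false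
  else
    let counts : PySem.Dict Char Int :=
      inputString.toList.foldl (fun d ch => d.insert ch (d.getD ch 0 + 1)) PySem.Dict.empty
    let odd : Int := (counts.values.map (fun v => PySem.Int.mod v 2)).sum
    decide (odd ≤ 1)

-- ===== PRECONDITION & SPEC =====
def Spec_solution (inputString : String) (out : Bool) : Prop := out = solution_alt inputString
instance (inputString : String) (out : Bool) : Decidable (Spec_solution inputString out) := by unfold Spec_solution; infer_instance

-- ===== CLAIM (what is proved, stated in full; the proofs are below) =====
def Claim_equal_solution : Prop := ∀ (inputString : String), Dom_solution inputString → Spec_solution inputString (solution inputString)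

-- ===== LEMMAS AND PROOFS =====

-- number of characters of l occurring an odd number of times
def OddCnt (l : List Char) : Nat := (PySem.List.dedup l).countP (fun c => l.count c % 2 == 1)

lemma sum_mod2_eq_countP (g : Char → Nat) (ds : List Char) :
    (ds.map (fun c => g c % 2)).sum = ds.countP (fun c => g c % 2 == 1) := by
  induction ds with
  | nil => simp
  | cons a t ih =>
    simp only [List.map_cons, List.sum_cons, List.countP_cons, ih]
    have : g a % 2 < 2 := Nat.mod_lt _ (by norm_num)
    by_cases h : g a % 2 = 1 <;> simp [h] <;> omega

lemma sum_map_mod2_parity (g : Char → Nat) (ds : List Char) :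
    (ds.map (fun c => g c % 2)).sum % 2 = (ds.map g).sum % 2 := by
  induction ds with
  | nil => simp
  | cons a t ih => simp only [List.map_cons, List.sum_cons]; omega

lemma pydedup_perm (l : List Char) : (PySem.List.dedup l).Perm l.dedup :=
  (List.perm_ext_iff_of_nodup (PySem.List.nodup_dedup l) l.nodup_dedup).mpr
    (by simp)

lemma oddCnt_parity (l : List Char) : OddCnt l % 2 = l.length % 2 := by
  have h1 := sum_mod2_eq_countP (fun c => l.count c) (PySem.List.dedup l)
  have h2 := sum_map_mod2_parity (fun c => l.count c) (PySem.List.dedup l)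
  have h3 : ((PySem.List.dedup l).map (fun c => l.count c)).sum
      = (l.dedup.map (fun c => l.count c)).sum := ((pydedup_perm l).map _).sum_eq
  have h4 := List.sum_map_count_dedup_eq_length l
  unfold OddCnt
  omega

lemma length_filter_ne (l : List Char) (c : Char) :
    (l.filter (· != c)).length + l.count c = l.length := by
  induction l with
  | nil => simp
  | cons a t ih =>
    by_cases h : a = c <;> simp [h] <;> omega

lemma countP_split (p : Char → Bool) (c : Char) :
    ∀ ds : List Char, ds.Nodup → c ∈ ds →
    ds.countP (fun x => p x && (x != c)) + (if p c then 1 else 0) = ds.countP p := by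
  intro ds
  induction ds with
  | nil => simp
  | cons a t ih =>
    intro hnd hmem
    have hant : a ∉ t := (List.nodup_cons.mp hnd).1
    have hnt : t.Nodup := (List.nodup_cons.mp hnd).2
    by_cases hac : a = c
    · subst hac
      have ht : t.countP (fun x => p x && (x != a)) = t.countP p := by
        apply List.countP_congr
        intro x hx
        have : x ≠ a := fun h => hant (h ▸ hx)
        simp [this]
      simp only [List.countP_cons, ht]
      simp
    · have hct : c ∈ t := by
        rcases List.mem_cons.mp hmem with h | h
        · exact absurd h.symm hac
        · exact h
      have := ih hnt hct
      simp only [List.countP_cons]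
      by_cases hpa : p a <;> simp [hpa, bne_iff_ne, hac] <;> omega

lemma oddCnt_filter (l : List Char) (c : Char) (hc : c ∈ l) :
    OddCnt (l.filter (· != c)) + l.count c % 2 = OddCnt l := by
  set l' := l.filter (· != c) with hl'
  have hmem' : ∀ x, x ∈ l' ↔ (x ∈ l ∧ x ≠ c) := by
    intro x; simp [hl', List.mem_filter, bne_iff_ne]
  have hcount' : ∀ x, x ≠ c → l'.count x = l.count x := by
    intro x hx
    exact List.count_filter (by simp [hx])
  -- step 1: predicate over l' counts equals predicate over l counts, on dedup l'
  have s1 : OddCnt l' = (PySem.List.dedup l').countP (fun x => l.count x % 2 == 1) := by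
    unfold OddCnt
    apply List.countP_congr
    intro x hx
    have hxl' : x ∈ l' := (PySem.List.mem_dedup l' x).mp hx
    have hxc : x ≠ c := ((hmem' x).mp hxl').2
    rw [hcount' x hxc]
  -- step 2: dedup l' is a permutation of (dedup l).filter (· != c)
  have s2 : (PySem.List.dedup l').Perm ((PySem.List.dedup l).filter (· != c)) := by
    apply (List.perm_ext_iff_of_nodup (PySem.List.nodup_dedup l')
      ((PySem.List.nodup_dedup l).filter _)).mpr
    intro x
    simp only [PySem.List.mem_dedup, List.mem_filter, bne_iff_ne]
    exact (hmem' x).trans (by simp)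
  -- step 3+4: split the countP on the nodup list dedup l
  have s3 : ((PySem.List.dedup l).filter (· != c)).countP (fun x => l.count x % 2 == 1)
      = (PySem.List.dedup l).countP (fun x => (l.count x % 2 == 1) && (x != c)) :=
    List.countP_filter ..
  have s4 : (PySem.List.dedup l).countP (fun x => (l.count x % 2 == 1) && (x != c))
      + (if (l.count c % 2 == 1) = true then 1 else 0)
      = (PySem.List.dedup l).countP (fun x => l.count x % 2 == 1) :=
    countP_split (fun x => l.count x % 2 == 1) c (PySem.List.dedup l)
      (PySem.List.nodup_dedup l) ((PySem.List.mem_dedup l c).mpr hc)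
  have hm2 : l.count c % 2 < 2 := Nat.mod_lt _ (by norm_num)
  have hiff : (if (l.count c % 2 == 1) = true then 1 else 0) = l.count c % 2 := by
    by_cases h : l.count c % 2 = 1 <;> simp [h]
    omega
  rw [s1, s2.countP_eq, s3]
  unfold OddCnt
  omega

lemma count_pos_of_mem {l : List Char} {c : Char} (h : c ∈ l) : 0 < l.count c :=
  List.count_pos_iff.mpr h

lemma loop_spec : ∀ (chars : List Char), ∀ rem : List Char, (∀ x ∈ rem, x ∈ chars) →
    ((solutionLoop rem chars 0 = true ↔ OddCnt rem ≤ 1) ∧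
     (rem.length % 2 = 0 → (solutionLoop rem chars 1 = true ↔ OddCnt rem = 0))) := by
  intro chars
  induction chars with
  | nil =>
    intro rem hsub
    have hrem : rem = [] := by
      rcases rem with _ | ⟨a, t⟩
      · rfl
      · have := hsub a (List.mem_cons_self); simp at this
    subst hrem
    constructor
    · simp [solutionLoop, OddCnt]
    · intro _; simp [solutionLoop, OddCnt]
  | cons c cs ih =>
    intro rem hsub
    by_cases hc : c ∈ rem
    · -- c occurs in the remaining string
      set rem' := rem.filter (· != c) with hrem'
      have hsub' : ∀ x ∈ rem', x ∈ cs := by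
        intro x hx
        have hxl : x ∈ rem := (List.mem_filter.mp hx).1
        have hxc : x ≠ c := by
          have := (List.mem_filter.mp hx).2; simpa [bne_iff_ne] using this
        rcases List.mem_cons.mp (hsub x hxl) with h | h
        · exact absurd h hxc
        · exact h
      have hlen := length_filter_ne rem c
      have hodd := oddCnt_filter rem c hc
      rw [← hrem'] at hlen hodd
      have hcnt := count_pos_of_mem hc
      have hcntle : rem.count c ≤ rem.length := List.count_le_length
      have hpar := oddCnt_parity rem
      have ihr := ih rem' hsub'
      by_cases hp : rem.count c % 2 = 0
      · -- even count: both guards are false, maximo unchanged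
        have hodd' : OddCnt rem' = OddCnt rem := by omega
        constructor
        · rw [show solutionLoop rem (c :: cs) 0 = solutionLoop rem' cs 0 by
            simp [solutionLoop, hp, ← hrem']]
          rw [ihr.1, hodd']
        · intro hL
          have hL' : rem'.length % 2 = 0 := by omega
          rw [show solutionLoop rem (c :: cs) 1 = solutionLoop rem' cs 1 by
            simp [solutionLoop, hp, ← hrem']]
          rw [ihr.2 hL', hodd']
      · -- odd count
        have hp1 : rem.count c % 2 = 1 := by omega
        have hoddge : 1 ≤ OddCnt rem := by omega
        constructor
        · by_cases hL : rem.length % 2 = 0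
          · -- odd count with even length: A returns False; OddCnt is even and ≥ 1, so ≥ 2
            rw [show solutionLoop rem (c :: cs) 0 = false by
              simp [solutionLoop, hp1, hL]]
            constructor
            · intro h; exact absurd h (by simp)
            · intro h; omega
          · -- odd count with odd length: maximo becomes 1, recurse
            have hL1 : rem.length % 2 = 1 := by omega
            have hL' : rem'.length % 2 = 0 := by omega
            rw [show solutionLoop rem (c :: cs) 0 = solutionLoop rem' cs 1 by
              simp [solutionLoop, hp1, hL1, ← hrem']]
            rw [ihr.2 hL']
            omega
        · intro hL
          -- maximo already 1, odd count with even length: A returns False; OddCnt ≥ 1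
          rw [show solutionLoop rem (c :: cs) 1 = false by
            simp [solutionLoop, hp1, hL]]
          constructor
          · intro h; exact absurd h (by simp)
          · intro h; omega
    · -- c does not occur any more: count is 0, filter keeps rem unchanged
      have hcnt0 : rem.count c = 0 := List.count_eq_zero.mpr hc
      have hfil : rem.filter (· != c) = rem := by
        apply List.filter_eq_self.mpr
        intro x hx
        simp [bne_iff_ne]
        exact fun h => hc (h ▸ hx)
      have hsub' : ∀ x ∈ rem, x ∈ cs := by
        intro x hx
        rcases List.mem_cons.mp (hsub x hx) with h | h
        · exact absurd (h ▸ hx) hc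
        · exact h
      have ihr := ih rem hsub'
      constructor
      · rw [show solutionLoop rem (c :: cs) 0 = solutionLoop rem cs 0 by
          simp [solutionLoop, hcnt0, hfil]]
        exact ihr.1
      · intro hL
        rw [show solutionLoop rem (c :: cs) 1 = solutionLoop rem cs 1 by
          simp [solutionLoop, hcnt0, hfil]]
        exact ihr.2 hL

-- B's hand-written counting loop builds exactly Counter(l)
lemma foldl_insert_eq_counter (l : List Char) :
    l.foldl (fun d ch => d.insert ch (d.getD ch 0 + 1)) (PySem.Dict.empty : PySem.Dict Char Int)
      = PySem.Dict.counter l := by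
  rw [PySem.Dict.counter_eq_foldl]
  suffices h : ∀ d : PySem.Dict Char Int,
      l.foldl (fun d ch => d.insert ch (d.getD ch 0 + 1)) d
        = l.foldl (fun d ch => d.modify ch 0 (· + 1)) d from h _
  induction l with
  | nil => intro d; rfl
  | cons a t ih =>
    intro d
    simp only [List.foldl_cons]
    rw [show d.modify a 0 (· + 1) = d.insert a (d.getD a 0 + 1) by
      simp [PySem.Dict.modify, PySem.Dict.getD]]
    exact ih _

lemma cast_sum_map (g : Char → Nat) (ds : List Char) :
    (ds.map (fun c => ((g c : Nat) : Int))).sum = (((ds.map g).sum : Nat) : Int) := by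
  induction ds with
  | nil => simp
  | cons a t ih => simp [ih]

lemma solution_alt_eq (s : String) :
    solution_alt s = if s.toList.length ≤ 1 then false else decide (OddCnt s.toList ≤ 1) := by
  by_cases h : s.toList.length ≤ 1
  · simp only [solution_alt, if_pos h]
  · simp only [solution_alt, if_neg h]
    rw [foldl_insert_eq_counter]
    have hvals : (PySem.Dict.counter s.toList).values
        = (PySem.List.dedup s.toList).map (fun k => ((s.toList.count k : Nat) : Int)) := by
      show ((PySem.Dict.counter s.toList).items).map (·.2) = _
      rw [PySem.Dict.items_counter]
      simp [List.map_map, Function.comp]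
    rw [hvals]
    have hmod : ∀ n : Nat, PySem.Int.mod ((n : Nat) : Int) 2 = (((n % 2 : Nat)) : Int) := by
      intro n; exact_mod_cast PySem.Int.mod_natCast n 2
    have hmap : ((PySem.List.dedup s.toList).map (fun k => ((s.toList.count k : Nat) : Int))).map
          (fun v => PySem.Int.mod v 2)
        = (PySem.List.dedup s.toList).map (fun k => (((s.toList.count k % 2 : Nat)) : Int)) := by
      rw [List.map_map]
      apply List.map_congr_left
      intro x _
      exact hmod _
    rw [hmap, cast_sum_map (fun k => s.toList.count k % 2),
      sum_mod2_eq_countP (fun c => s.toList.count c)]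
    have : ((((PySem.List.dedup s.toList).countP
        (fun c => s.toList.count c % 2 == 1) : Nat)) : Int) ≤ 1
        ↔ OddCnt s.toList ≤ 1 := by
      unfold OddCnt; exact_mod_cast Iff.rfl
    simp only [decide_eq_decide]
    exact this

-- ===== VERDICT (by name: the statement is the Claim_ definition above) =====
theorem solution_spec : Claim_equal_solution := by
  intro s _
  unfold Spec_solution
  rw [solution_alt_eq]
  unfold solution
  by_cases h : s.toList.length ≤ 1
  · rw [if_pos h, if_pos h]
  · rw [if_neg h, if_neg h]
    have := (loop_spec s.toList s.toList (fun x hx => hx)).1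
    by_cases hodd : OddCnt s.toList ≤ 1
    · simp [hodd, this.mpr hodd]
    · simp only [hodd, decide_false]
      cases hb : solutionLoop s.toList s.toList 0
      · rfl
      · exact absurd (this.mp hb) hodd
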